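-- pv_equiv track=rewrite | github.com/manuelcorpas/17-EHR | PYTHON/03-00-ihcc-fetch-pubmed.py | is_preprint
-- ===== SOURCE A (Python) =====
-- from typing import Dict, List, Optional, Tuple
--
-- PREPRINT_SOURCES = [
--     "medrxiv", "biorxiv", "arxiv", "research square",
--     "ssrn", "preprints", "chemrxiv", "f1000research"
-- ]
--
-- def safe_str(value) -> str:
--     """Safely convert value to string, handling None."""
--     if value is None:
--         return ''
--     return str(value)
--
-- def is_preprint(record: Dict) -> bool:
--     """Check if a publication is a preprint."""
--     source = safe_str(record.get('source')).lower()
--     title = safe_str(record.get('title')).lower()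
--     journal = safe_str(record.get('journal')).lower()
--
--     for preprint in PREPRINT_SOURCES:
--         if preprint in source or preprint in title or preprint in journal:
--             return True
--     return False
-- ===== SOURCE B (Python) =====
-- # B: instead of testing every keyword as a substring of each field, scan each
-- # lowercased field position by position; a dict built once from PREPRINT_SOURCES
-- # maps a first character to the keywords starting with it, so at each position
-- # only keywords whose first character matches are tested with startswith.
-- PREPRINT_SOURCES = [
--     "medrxiv", "biorxiv", "arxiv", "research square",
--     "ssrn", "preprints", "chemrxiv", "f1000research"
-- ]
--
-- _INDEX = {}
-- for _kw in PREPRINT_SOURCES: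
--     _INDEX.setdefault(_kw[0], []).append(_kw)
--
-- def safe_str(value) -> str:
--     if value is None:
--         return ''
--     return str(value)
--
-- def is_preprint(record) -> bool:
--     for key in ("source", "title", "journal"):
--         text = safe_str(record.get(key)).lower()
--         for i, ch in enumerate(text):
--             for kw in _INDEX.get(ch, ()):
--                 if text.startswith(kw, i):
--                     return True
--     return False
-- ===== Notes on version B (the rewrite author's own statement) =====
-- stated objective: alternative
-- what changed: A tests each keyword as a substring of the three fields; B scans each lowercased field position by position, using a dict built once from the keywords (first character -> keywords) so that at every position only keywords whose first character matches are checked with startswith.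
import Mathlib
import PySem

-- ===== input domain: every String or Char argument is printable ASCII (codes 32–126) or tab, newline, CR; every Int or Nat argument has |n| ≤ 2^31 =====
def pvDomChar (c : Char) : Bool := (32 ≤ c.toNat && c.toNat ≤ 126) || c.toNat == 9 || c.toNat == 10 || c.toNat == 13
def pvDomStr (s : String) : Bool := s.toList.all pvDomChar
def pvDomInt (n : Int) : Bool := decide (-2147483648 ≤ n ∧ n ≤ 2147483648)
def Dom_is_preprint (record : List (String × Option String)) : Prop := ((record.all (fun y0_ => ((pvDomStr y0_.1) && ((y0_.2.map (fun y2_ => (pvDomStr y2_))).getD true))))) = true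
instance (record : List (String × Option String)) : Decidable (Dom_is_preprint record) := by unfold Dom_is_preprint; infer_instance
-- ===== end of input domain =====

-- B replaces A's per-keyword substring tests by a position-wise scan of each field,
-- using a first-character index over the keywords; objective: alternative (no speed claim).

def preprintSources : List String :=
  ["medrxiv", "biorxiv", "arxiv", "research square",
   "ssrn", "preprints", "chemrxiv", "f1000research"]

def pySafeStr : Option String → String
  | none => ""
  | some v => v

-- ===== PORT A =====
def is_preprint (record : List (String × Option String)) : Bool :=
  let source := PySem.Str.lower (pySafeStr (PySem.Dict.getD (PySem.Dict.mk record) "source" none))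
  let title := PySem.Str.lower (pySafeStr (PySem.Dict.getD (PySem.Dict.mk record) "title" none))
  let journal := PySem.Str.lower (pySafeStr (PySem.Dict.getD (PySem.Dict.mk record) "journal" none))
  preprintSources.any (fun preprint =>
    PySem.Str.isIn preprint source || PySem.Str.isIn preprint title ||
      PySem.Str.isIn preprint journal)

-- ===== PORT B =====
-- Source B's module-level loop: _INDEX.setdefault(_kw[0], []).append(_kw)
def preprintIndex : PySem.Dict Char (List String) :=
  preprintSources.foldl
    (fun d kw => PySem.Dict.modify d (kw.toList.headD ' ') [] (fun l => l ++ [kw]))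
    PySem.Dict.empty

def is_preprint_alt (record : List (String × Option String)) : Bool :=
  ["source", "title", "journal"].any (fun key =>
    let text := PySem.Str.lower (pySafeStr (PySem.Dict.getD (PySem.Dict.mk record) key none))
    -- for i, ch in enumerate(text): position i viewed as the suffix text[i:], a nonempty tail
    (List.tails text.toList).any (fun t =>
      match t with
      | [] => false
      | ch :: _ =>
        (PySem.Dict.getD preprintIndex ch []).any (fun kw =>
          -- text.startswith(kw, i)
          kw.toList.isPrefixOf t)))

-- ===== PRECONDITION & SPEC =====
def Spec_is_preprint (record : List (String × Option String)) (out : Bool) : Prop := out = is_preprint_alt record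
instance (record : List (String × Option String)) (out : Bool) : Decidable (Spec_is_preprint record out) := by unfold Spec_is_preprint; infer_instance

-- ===== CLAIM (what is proved, stated in full; the proofs are below) =====
def Claim_equal_is_preprint : Prop := ∀ (record : List (String × Option String)), Dom_is_preprint record → Spec_is_preprint record (is_preprint record)

-- ===== LEMMAS AND PROOFS =====

-- the index built by Source B's loop maps c to exactly the keywords whose first character is c
theorem pv_bucket (c : Char) :
    PySem.Dict.getD preprintIndex c [] =
      preprintSources.filter (fun kw => kw.toList.headD ' ' == c) := by
  have h : preprintIndex =
      (preprintSources.map (fun kw => (kw.toList.headD ' ', kw))).foldl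
        (fun d p => PySem.Dict.modify d p.1 [] (fun l => l ++ [p.2])) PySem.Dict.empty := by
    simp [preprintIndex, List.foldl_map]
  rw [h, PySem.Dict.getD_foldl_modify_append]
  simp [PySem.Dict.getD_empty, List.filter_map, Function.comp_def]

-- the first-character test is subsumed by the prefix test at a position starting with c
theorem pv_first_char (kw : String) (c : Char) (rest : List Char) (hne : kw.toList ≠ []) :
    ((kw.toList.headD ' ' == c) && kw.toList.isPrefixOf (c :: rest))
      = kw.toList.isPrefixOf (c :: rest) := by
  obtain ⟨k0, ks, h⟩ := List.exists_cons_of_ne_nil hne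
  rw [h]
  show ((k0 == c) && ((k0 == c) && ks.isPrefixOf rest)) = ((k0 == c) && ks.isPrefixOf rest)
  cases k0 == c <;> simp

-- at one position, testing only the first character's bucket equals testing every keyword
theorem pv_scan_step (t : List Char) :
    (match t with
      | [] => false
      | ch :: _ => (PySem.Dict.getD preprintIndex ch []).any (fun kw => kw.toList.isPrefixOf t))
    = preprintSources.any (fun kw => kw.toList.isPrefixOf t) := by
  cases t with
  | nil => decide
  | cons c rest =>
    show (PySem.Dict.getD preprintIndex c []).any (fun kw => kw.toList.isPrefixOf (c :: rest))
        = preprintSources.any (fun kw => kw.toList.isPrefixOf (c :: rest))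
    rw [pv_bucket, List.any_filter]
    simp only [preprintSources, List.any_cons, List.any_nil]
    rw [pv_first_char, pv_first_char, pv_first_char, pv_first_char,
        pv_first_char, pv_first_char, pv_first_char, pv_first_char] <;> decide

-- the position-wise scan of a text equals the per-keyword substring tests on it
theorem pv_field_scan (text : String) :
    ((List.tails text.toList).any (fun t =>
      match t with
      | [] => false
      | ch :: _ => (PySem.Dict.getD preprintIndex ch []).any (fun kw => kw.toList.isPrefixOf t)))
    = preprintSources.any (fun kw => PySem.Str.isIn kw text) := by
  simp only [pv_scan_step]
  rw [Bool.eq_iff_iff]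
  simp only [List.any_eq_true, List.mem_tails, List.isPrefixOf_iff_prefix,
    PySem.Str.isIn_iff_infix, List.infix_iff_prefix_suffix]
  constructor
  · rintro ⟨t, ht, kw, hkw, hp⟩
    exact ⟨kw, hkw, t, hp, ht⟩
  · rintro ⟨kw, hkw, t, hp, ht⟩
    exact ⟨t, ht, kw, hkw, hp⟩

-- ===== VERDICT (by name: the statement is the Claim_ definition above) =====
theorem is_preprint_spec : Claim_equal_is_preprint := by
  intro record _
  unfold Spec_is_preprint is_preprint is_preprint_alt
  simp only [List.any_cons, List.any_nil, Bool.or_false]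
  rw [pv_field_scan, pv_field_scan, pv_field_scan]
  rw [Bool.eq_iff_iff]
  simp only [List.any_eq_true, Bool.or_eq_true]
  constructor
  · rintro ⟨p, hp, (h | h) | h⟩
    · exact Or.inl ⟨p, hp, h⟩
    · exact Or.inr (Or.inl ⟨p, hp, h⟩)
    · exact Or.inr (Or.inr ⟨p, hp, h⟩)
  · rintro (⟨p, hp, h⟩ | ⟨p, hp, h⟩ | ⟨p, hp, h⟩)
    · exact ⟨p, hp, Or.inl (Or.inl h)⟩
    · exact ⟨p, hp, Or.inl (Or.inr h)⟩
    · exact ⟨p, hp, Or.inr h⟩
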